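-- pv_equiv track=rewrite | github.com/namisan/mt-dnn | experiments/squad/squad_utils.py | token_doc
-- ===== SOURCE A (Python) =====
-- def is_whitespace(c):
--     if c == " " or c == "\t" or c == "\r" or c == "\n" or ord(c) == 0x202F:
--         return True
--     return False
--
-- def token_doc(paragraph_text):
--     doc_tokens = []
--     char_to_word_offset = []
--     prev_is_whitespace = True
--     for c in paragraph_text:
--         if is_whitespace(c):
--             prev_is_whitespace = True
--         else:
--             if prev_is_whitespace:
--                 doc_tokens.append(c)
--             else:
--                 doc_tokens[-1] += c
--             prev_is_whitespace = False
--         char_to_word_offset.append(len(doc_tokens) - 1)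
--     return doc_tokens, char_to_word_offset
-- ===== SOURCE B (Python) =====
-- import re
--
-- _TOKEN_RE = re.compile(r'[^ \t\r\n\u202f]+')
--
-- def token_doc(paragraph_text):
--     matches = list(_TOKEN_RE.finditer(paragraph_text))
--     doc_tokens = [m.group(0) for m in matches]
--     starts = iter(m.start() for m in matches)
--     nxt = next(starts, None)
--     word_idx = -1
--     char_to_word_offset = []
--     for p in range(len(paragraph_text)):
--         if nxt == p:
--             word_idx += 1
--             nxt = next(starts, None)
--         char_to_word_offset.append(word_idx)
--     return doc_tokens, char_to_word_offset
-- ===== Notes on version B (the rewrite author's own statement) =====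
-- stated objective: faster
-- what changed: B finds whole token spans with a regex (re.finditer) and derives char offsets in a separate linear pass with a start-position pointer, instead of A's single char loop that mutates the last token via repeated string concatenation under a prev_is_whitespace flag.
import Mathlib
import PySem

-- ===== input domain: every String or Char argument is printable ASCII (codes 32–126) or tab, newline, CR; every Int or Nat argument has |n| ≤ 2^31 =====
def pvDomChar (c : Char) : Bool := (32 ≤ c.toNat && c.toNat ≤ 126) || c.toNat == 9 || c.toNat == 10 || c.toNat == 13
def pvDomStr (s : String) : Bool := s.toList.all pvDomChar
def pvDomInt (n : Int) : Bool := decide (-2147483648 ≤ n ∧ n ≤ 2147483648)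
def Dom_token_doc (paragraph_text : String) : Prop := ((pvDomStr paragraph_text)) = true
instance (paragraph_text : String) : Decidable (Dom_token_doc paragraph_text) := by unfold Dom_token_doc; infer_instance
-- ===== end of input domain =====

-- B replaces A's char-by-char loop (prev_is_whitespace flag, last-token mutation) by a regex-style
-- span scan producing whole tokens plus a second positions pass with a start pointer; objective: faster (avoids per-char re-concatenation of the last token).

-- ===== PORT A =====
-- is_whitespace(c)
def aIsWs (c : Char) : Bool := c == ' ' || c == '\t' || c == '\r' || c == '\n' || c.toNat == 0x202F

-- doc_tokens[-1] += c (tokens kept as List Char, turned into String at the end)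
def aAppendLast : List (List Char) → Char → List (List Char)
  | [], _ => []
  | [t], c => [t ++ [c]]
  | t :: ts, c => t :: aAppendLast ts c

-- the for-loop of A over the characters, state = (doc_tokens, char_to_word_offset, prev_is_whitespace)
def aLoop : List Char → List (List Char) → List Int → Bool → List (List Char) × List Int
  | [], toks, offs, _ => (toks, offs)
  | c :: cs, toks, offs, prev =>
    if aIsWs c then aLoop cs toks (offs ++ [(toks.length : Int) - 1]) true
    else
      let toks' := if prev then toks ++ [[c]] else aAppendLast toks c
      aLoop cs toks' (offs ++ [(toks'.length : Int) - 1]) false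

def token_doc (paragraph_text : String) : List String × List Int :=
  let r := aLoop paragraph_text.toList [] [] true
  (r.1.map String.mk, r.2)

-- ===== PORT B =====
-- the regex character class [^ \t\r\n\u202f]
def bNonWs (c : Char) : Bool := !(c == ' ' || c == '\t' || c == '\r' || c == '\n' || c.toNat == 0x202F)

-- re.finditer: list of (start, matched chars) for maximal runs of bNonWs characters
def bSpans : List Char → Nat → List (Nat × List Char)
  | [], _ => []
  | c :: cs, p =>
    if bNonWs c then
      let run := (c :: cs).takeWhile bNonWs
      (p, run) :: bSpans ((c :: cs).dropWhile bNonWs) (p + run.length)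
    else bSpans cs (p + 1)
  termination_by cs _ => cs.length
  decreasing_by
    · simp only [List.dropWhile_cons, *, if_pos]
      exact Nat.lt_succ_of_le (List.length_dropWhile_le _ _)
    · simp

-- the second pass: for p in range(n), advance word_idx when p is the next token start
def bOff : Nat → Nat → List Nat → Int → List Int
  | 0, _, _, _ => []
  | n + 1, p, starts, w =>
    match starts with
    | s :: rest => if s = p then (w + 1) :: bOff n (p + 1) rest (w + 1)
                   else w :: bOff n (p + 1) (s :: rest) w
    | [] => w :: bOff n (p + 1) [] w

def token_doc_alt (paragraph_text : String) : List String × List Int :=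
  let cs := paragraph_text.toList
  let sp := bSpans cs 0
  (sp.map (fun x => String.mk x.2), bOff cs.length 0 (sp.map Prod.fst) (-1))

-- ===== PRECONDITION & SPEC =====
def Spec_token_doc (paragraph_text : String) (out : List String × List Int) : Prop := out = token_doc_alt paragraph_text
instance (paragraph_text : String) (out : List String × List Int) : Decidable (Spec_token_doc paragraph_text out) := by unfold Spec_token_doc; infer_instance

-- ===== CLAIM (what is proved, stated in full; the proofs are below) =====
def Claim_equal_token_doc : Prop := ∀ (paragraph_text : String), Dom_token_doc paragraph_text → Spec_token_doc paragraph_text (token_doc paragraph_text)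

-- ===== LEMMAS AND PROOFS =====

theorem bNonWs_eq_not_aIsWs (c : Char) : bNonWs c = !aIsWs c := by
  simp [bNonWs, aIsWs]

theorem aAppendLast_cons_ne (a : List Char) (l : List (List Char)) (c : Char) (h : l ≠ []) :
    aAppendLast (a :: l) c = a :: aAppendLast l c := by
  cases l with
  | nil => exact absurd rfl h
  | cons b bs => rfl

theorem aAppendLast_append (toks : List (List Char)) (t : List Char) (c : Char) :
    aAppendLast (toks ++ [t]) c = toks ++ [t ++ [c]] := by
  induction toks with
  | nil => rfl
  | cons x xs ih =>
    rw [List.cons_append, aAppendLast_cons_ne x (xs ++ [t]) c (by simp), ih]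
    simp

theorem bSpans_fst_ge (cs : List Char) (p : Nat) :
    ∀ q ∈ (bSpans cs p).map Prod.fst, p ≤ q := by
  induction cs, p using bSpans.induct with
  | case1 => simp [bSpans]
  | case2 c cs p h run ih =>
    intro q hq
    rw [bSpans, if_pos h] at hq
    simp only [List.map_cons, List.mem_cons] at hq
    rcases hq with rfl | hq
    · exact le_refl _
    · exact le_trans (Nat.le_add_right _ _) (ih q hq)
  | case3 c cs p h ih =>
    intro q hq
    rw [bSpans, if_neg h] at hq
    exact le_trans (Nat.le_succ _) (ih q hq)

theorem bOff_skip (n p : Nat) (starts : List Nat) (w : Int) (h : ∀ s ∈ starts, p < s) :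
    bOff (n + 1) p starts w = w :: bOff n (p + 1) starts w := by
  cases starts with
  | nil => rfl
  | cons s rest =>
    have : s ≠ p := Nat.ne_of_gt (h s (List.mem_cons_self ..))
    simp [bOff, this]

-- The central invariant: A's loop from state (toks, offs, prev) computes what B computes on the
-- remaining characters, in both flag states (prev = true, and prev = false with last token t).
theorem aLoop_eq_b (cs : List Char) :
    (∀ toks offs p, aLoop cs toks offs true =
      (toks ++ (bSpans cs p).map Prod.snd,
       offs ++ bOff cs.length p ((bSpans cs p).map Prod.fst) ((toks.length : Int) - 1))) ∧
    (∀ toks t offs p, aLoop cs (toks ++ [t]) offs false =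
      ((toks ++ [t ++ cs.takeWhile bNonWs])
         ++ (bSpans (cs.dropWhile bNonWs) (p + (cs.takeWhile bNonWs).length)).map Prod.snd,
       offs ++ bOff cs.length p
         ((bSpans (cs.dropWhile bNonWs) (p + (cs.takeWhile bNonWs).length)).map Prod.fst)
         (toks.length : Int))) := by
  induction cs with
  | nil =>
    constructor
    · intro toks offs p; simp [aLoop, bSpans, bOff]
    · intro toks t offs p; simp [aLoop, bSpans, bOff]
  | cons c cs ih =>
    obtain ⟨ihT, ihF⟩ := ih
    by_cases hws : aIsWs c = true
    · have hnw : bNonWs c = false := by rw [bNonWs_eq_not_aIsWs, hws]; rfl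
      have hsp : ∀ p, bSpans (c :: cs) p = bSpans cs (p + 1) := by
        intro p; rw [bSpans, if_neg (by simp [hnw])]
      have hgt : ∀ p, ∀ s ∈ (bSpans cs (p + 1)).map Prod.fst, p < s := fun p s hs =>
        Nat.lt_of_lt_of_le (Nat.lt_succ_self p) (bSpans_fst_ge cs (p + 1) s hs)
      constructor
      · intro toks offs p
        have hstep : aLoop (c :: cs) toks offs true
            = aLoop cs toks (offs ++ [(toks.length : Int) - 1]) true := by
          simp [aLoop, hws]
        rw [hstep, ihT toks _ (p + 1), hsp p, List.length_cons,
          bOff_skip _ _ _ _ (hgt p), List.append_assoc]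
        simp
      · intro toks t offs p
        have htw : (c :: cs).takeWhile bNonWs = [] := by simp [hnw]
        have hdw : (c :: cs).dropWhile bNonWs = c :: cs := by simp [hnw]
        have hstep : aLoop (c :: cs) (toks ++ [t]) offs false
            = aLoop cs (toks ++ [t]) (offs ++ [((toks ++ [t]).length : Int) - 1]) true := by
          simp [aLoop, hws]
        have hlen : (((toks ++ [t]).length : Int) - 1) = (toks.length : Int) := by
          simp only [List.length_append, List.length_cons, List.length_nil]; push_cast; ring
        rw [hstep, ihT (toks ++ [t]) _ (p + 1), hlen]
        simp only [htw, hdw, List.length_nil, Nat.add_zero, List.append_nil, hsp p,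
          List.length_cons]
        rw [bOff_skip _ _ _ _ (hgt p), List.append_assoc]
        simp
    · have hws' : aIsWs c = false := by
        cases h : aIsWs c
        · rfl
        · exact absurd h hws
      have hnw : bNonWs c = true := by rw [bNonWs_eq_not_aIsWs, hws']; rfl
      have htw : (c :: cs).takeWhile bNonWs = c :: cs.takeWhile bNonWs := by
        simp [hnw]
      have hdw : (c :: cs).dropWhile bNonWs = cs.dropWhile bNonWs := by
        simp [hnw]
      have hsp : ∀ p, bSpans (c :: cs) p
          = (p, c :: cs.takeWhile bNonWs)
            :: bSpans (cs.dropWhile bNonWs) (p + ((cs.takeWhile bNonWs).length + 1)) := by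
        intro p
        rw [bSpans, if_pos hnw]
        simp [htw, hdw]
      have hgt : ∀ p, ∀ s ∈ (bSpans (cs.dropWhile bNonWs)
          ((p + 1) + (cs.takeWhile bNonWs).length)).map Prod.fst, p < s := by
        intro p s hs
        have := bSpans_fst_ge (cs.dropWhile bNonWs) ((p + 1) + (cs.takeWhile bNonWs).length) s hs
        omega
      have hp1 : ∀ p, p + ((cs.takeWhile bNonWs).length + 1)
          = (p + 1) + (cs.takeWhile bNonWs).length := by intro p; omega
      constructor
      · intro toks offs p
        have hstep : aLoop (c :: cs) toks offs true
            = aLoop cs (toks ++ [[c]]) (offs ++ [((toks ++ [[c]]).length : Int) - 1]) false := by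
          simp [aLoop, hws']
        have hlen1 : (((toks ++ [[c]]).length : Int) - 1) = (toks.length : Int) := by
          simp only [List.length_append, List.length_cons, List.length_nil]; push_cast; ring
        rw [hstep, ihF toks [c] _ (p + 1), hlen1, hsp p, hp1 p]
        simp only [List.map_cons, List.length_cons, bOff, if_pos]
        have hw1 : ((toks.length : Int) - 1) + 1 = (toks.length : Int) := by ring
        rw [hw1, List.append_assoc]
        simp
      · intro toks t offs p
        have hstep : aLoop (c :: cs) (toks ++ [t]) offs false
            = aLoop cs (aAppendLast (toks ++ [t]) c)
                (offs ++ [((aAppendLast (toks ++ [t]) c).length : Int) - 1]) false := by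
          simp [aLoop, hws']
        have hlen1 : (((toks ++ [t ++ [c]]).length : Int) - 1) = (toks.length : Int) := by
          simp only [List.length_append, List.length_cons, List.length_nil]; push_cast; ring
        rw [hstep, aAppendLast_append, hlen1, ihF toks (t ++ [c]) _ (p + 1), htw, hdw,
          List.length_cons]
        rw [hp1 p, List.length_cons, bOff_skip _ _ _ _ (hgt p), List.append_assoc]
        simp

theorem token_doc_eq_alt (s : String) : token_doc s = token_doc_alt s := by
  have h := (aLoop_eq_b s.toList).1 [] [] 0
  simp only [List.nil_append, List.length_nil, Nat.cast_zero, zero_sub] at h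
  simp [token_doc, token_doc_alt, h]

-- ===== VERDICT (by name: the statement is the Claim_ definition above) =====
theorem token_doc_spec : Claim_equal_token_doc := by
  intro s _
  show token_doc s = token_doc_alt s
  exact token_doc_eq_alt s
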